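-- pv_equiv track=rewrite | github.com/Mr-Harsh-Dixit/Project_Euler_Solutions | Python/Problem_088.py | euler_88
-- ===== SOURCE A (Python) =====
-- def euler_88(KMAX=12000):
--     LIMIT = 2 * KMAX
--     best = [10**18] * (KMAX + 1)
--
--     def dfs(start, prod, s, m):
--         k = m + (prod - s)
--         if k <= KMAX:
--             if prod < best[k]:
--                 best[k] = prod
--         for f in range(start, LIMIT // prod + 1):
--             dfs(f, prod * f, s + f, m + 1)
--
--     dfs(2, 1, 0, 0)
--
--     return sum(set(best[2:]))
-- ===== SOURCE B (Python) =====
-- def euler_88(KMAX=12000):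
--     LIMIT = 2 * KMAX
--
--     def candidates(start, prod, s, m):
--         here = [(m + (prod - s), prod)]
--         return here + [c
--                        for f in range(start, LIMIT // prod + 1)
--                        for c in candidates(f, prod * f, s + f, m + 1)]
--
--     best = [10**18] * (KMAX + 1)
--     for k, p in candidates(2, 1, 0, 0):
--         if k <= KMAX and p < best[k]:
--             best[k] = p
--     return sum(set(best[2:]))
-- ===== Notes on version B (the rewrite author's own statement) =====
-- stated objective: alternative
-- what changed: Decouples enumeration from aggregation: a pure recursive generator returns the list of (k, prod) candidates (cons + flattened comprehension) and a separate single fold takes the minima into the best array, instead of A's DFS mutating the best array in place inside the recursion.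
import Mathlib
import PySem

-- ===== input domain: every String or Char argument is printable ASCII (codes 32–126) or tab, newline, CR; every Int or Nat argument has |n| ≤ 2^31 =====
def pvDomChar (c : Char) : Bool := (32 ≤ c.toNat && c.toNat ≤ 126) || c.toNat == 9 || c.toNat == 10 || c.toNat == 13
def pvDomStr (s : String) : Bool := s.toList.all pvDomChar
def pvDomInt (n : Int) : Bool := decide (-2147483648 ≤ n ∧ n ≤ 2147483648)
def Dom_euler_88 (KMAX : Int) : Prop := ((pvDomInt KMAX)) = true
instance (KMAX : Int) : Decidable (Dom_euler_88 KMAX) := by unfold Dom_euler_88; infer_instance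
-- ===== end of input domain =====

-- B decouples enumeration from aggregation: a pure recursive generator of (k, prod)
-- candidates plus one separate min-fold, instead of A's DFS mutating best in place.
-- Fuel (2*KMAX).toNat + 1 is a totality guard only; it exceeds the recursion depth
-- (each level at least doubles prod, which stays ≤ 2*KMAX).

-- ===== PORT A =====
-- A's inner dfs: threads the best array through the recursion, updating it in place.
def pvDfsA (KMAX LIMIT : Int) : Nat → Int → Int → Int → Int → List Int → List Int
  | 0, _, _, _, _, best => best
  | n+1, start, prod, s, m, best =>
    let k := m + (prod - s)
    let best1 :=
      if k ≤ KMAX then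
        (if prod < PySem.List.pyGetD best k 0 then PySem.List.pySetD best k prod else best)
      else best
    (PySem.List.pyRange start (PySem.Int.floordiv LIMIT prod + 1) 1).foldl
      (fun b f => pvDfsA KMAX LIMIT n f (prod * f) (s + f) (m + 1) b) best1

def euler_88 (KMAX : Int) : Int :=
  let LIMIT := 2 * KMAX
  let best0 := List.replicate (KMAX + 1).toNat ((10 : Int) ^ 18)
  let best := pvDfsA KMAX LIMIT ((2 * KMAX).toNat + 1) 2 1 0 0 best0
  (PySem.Set.ofList (PySem.List.slice best (some 2) none)).sum

-- ===== PORT B =====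
-- B's candidates: pure enumeration, returns the list of (k, prod) pairs.
def pvGenB (LIMIT : Int) : Nat → Int → Int → Int → Int → List (Int × Int)
  | 0, _, _, _, _ => []
  | n+1, start, prod, s, m =>
    [(m + (prod - s), prod)]
      ++ (PySem.List.pyRange start (PySem.Int.floordiv LIMIT prod + 1) 1).flatMap
           (fun f => pvGenB LIMIT n f (prod * f) (s + f) (m + 1))

def euler_88_alt (KMAX : Int) : Int :=
  let LIMIT := 2 * KMAX
  let cands := pvGenB LIMIT ((2 * KMAX).toNat + 1) 2 1 0 0
  let best := cands.foldl
    (fun b kp =>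
      if kp.1 ≤ KMAX ∧ kp.2 < PySem.List.pyGetD b kp.1 0 then PySem.List.pySetD b kp.1 kp.2 else b)
    (List.replicate (KMAX + 1).toNat ((10 : Int) ^ 18))
  (PySem.Set.ofList (PySem.List.slice best (some 2) none)).sum

-- ===== PRECONDITION & SPEC =====
def Spec_euler_88 (KMAX : Int) (out : Int) : Prop := out = euler_88_alt KMAX
instance (KMAX : Int) (out : Int) : Decidable (Spec_euler_88 KMAX out) := by unfold Spec_euler_88; infer_instance

-- ===== CLAIM (what is proved, stated in full; the proofs are below) =====
def Claim_equal_euler_88 : Prop := ∀ (KMAX : Int), Dom_euler_88 KMAX → Spec_euler_88 KMAX (euler_88 KMAX)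

-- ===== LEMMAS AND PROOFS =====

-- B's aggregation step, named for the proofs.
def pvUpd (KMAX : Int) (b : List Int) (kp : Int × Int) : List Int :=
  if kp.1 ≤ KMAX ∧ kp.2 < PySem.List.pyGetD b kp.1 0 then PySem.List.pySetD b kp.1 kp.2 else b

-- Folding the aggregation over a flattened comprehension splits into nested folds.
theorem pv_foldl_flatMap {β γ δ : Type} (g : β → List γ) (u : δ → γ → δ) (l : List β) :
    ∀ (d : δ),
      (l.flatMap g).foldl u d = l.foldl (fun d0 f => (g f).foldl u d0) d := by
  induction l with
  | nil => intro d; rfl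
  | cons a l ih =>
      intro d
      simp only [List.flatMap_cons, List.foldl_cons, List.foldl_append]
      rw [ih]

-- Main invariant: A's DFS equals B's generator followed by the min-fold, for every fuel.
theorem pv_dfs_eq_gen_fold (KMAX LIMIT : Int) :
    ∀ (n : Nat) (start prod s m : Int) (best : List Int),
      pvDfsA KMAX LIMIT n start prod s m best
        = (pvGenB LIMIT n start prod s m).foldl (pvUpd KMAX) best := by
  intro n
  induction n with
  | zero => intro start prod s m best; rfl
  | succ n ih =>
      intro start prod s m best
      rw [pvDfsA, pvGenB, List.singleton_append, List.foldl_cons,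
        pv_foldl_flatMap (fun f => pvGenB LIMIT n f (prod * f) (s + f) (m + 1)) (pvUpd KMAX)]
      simp only [ih]
      congr 1
      -- the seed: A's in-place update equals one aggregation step on the candidate
      simp only [pvUpd]
      split_ifs with h1 h2 h3 h4 h5 <;> first | rfl | (exfalso; tauto)

theorem euler_88_spec : Claim_equal_euler_88 := by
  intro KMAX _
  show euler_88 KMAX = euler_88_alt KMAX
  simp only [euler_88, euler_88_alt, pv_dfs_eq_gen_fold]
  rfl
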